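-- pv_equiv track=rewrite | github.com/michlee1337/practice | Python/giantCatArmyRiddle.py | listmultiples
-- ===== SOURCE A (Python) =====
-- def listmultiples(x1,x2):
--     m = []
--     for i in range(10):
--         n = []
--         for j in range (10):
--             n.append((x1**i)*(x2**j))
--
--         m.append(n)
--     return m
-- ===== SOURCE B (Python) =====
-- def listmultiples(x1, x2):
--     # Recurrence, no exponentiation: first row is the running products of x2,
--     # each later row is the previous row scaled by x1.
--     row = []
--     v = 1
--     for _ in range(10):
--         row.append(v)
--         v *= x2
--     m = [row]
--     for _ in range(9):
--         row = [x1 * c for c in row]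
--         m.append(row)
--     return m
-- ===== Notes on version B (the rewrite author's own statement) =====
-- stated objective: alternative
-- what changed: B computes no powers at all: it builds the first row as running products v*=x2 and then derives each subsequent row from the previous one by scaling it by x1 (row_i = x1*row_{i-1}), a dynamic-programming recurrence instead of A's per-cell x1**i * x2**j.
import Mathlib
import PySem

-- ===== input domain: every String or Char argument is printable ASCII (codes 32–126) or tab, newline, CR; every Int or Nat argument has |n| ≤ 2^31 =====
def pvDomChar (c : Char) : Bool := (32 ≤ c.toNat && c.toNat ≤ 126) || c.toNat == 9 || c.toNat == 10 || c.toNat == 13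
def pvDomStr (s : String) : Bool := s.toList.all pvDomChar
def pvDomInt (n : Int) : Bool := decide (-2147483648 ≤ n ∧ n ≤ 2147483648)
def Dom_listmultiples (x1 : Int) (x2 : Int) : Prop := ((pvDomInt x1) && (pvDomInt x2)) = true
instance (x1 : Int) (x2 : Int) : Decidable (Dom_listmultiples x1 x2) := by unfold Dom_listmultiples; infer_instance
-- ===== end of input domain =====

-- B replaces A's per-cell exponentiations by a row recurrence (running products); equal return value, no speed claim.

-- ===== PORT A =====
-- A: nested loops appending (x1**i)*(x2**j) per cell.
def listmultiples (x1 : Int) (x2 : Int) : List (List Int) :=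
  (PySem.List.pyRange 0 10 1).foldl (fun m i =>
    m ++ [(PySem.List.pyRange 0 10 1).foldl (fun n j =>
      n ++ [(x1 ^ i.toNat) * (x2 ^ j.toNat)]) []]) []

-- ===== PORT B =====
-- B: first row = running products of x2; each later row = previous row scaled by x1.
def listmultiples_alt (x1 : Int) (x2 : Int) : List (List Int) :=
  let rv := (PySem.List.pyRange 0 10 1).foldl
    (fun (st : List Int × Int) _ => (st.1 ++ [st.2], st.2 * x2)) ([], 1)
  let mr := (PySem.List.pyRange 0 9 1).foldl
    (fun (st : List (List Int) × List Int) _ =>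
      let row := st.2.map (fun c => x1 * c)
      (st.1 ++ [row], row)) ([rv.1], rv.1)
  mr.1

-- ===== PRECONDITION & SPEC =====
def Spec_listmultiples (x1 : Int) (x2 : Int) (out : List (List Int)) : Prop := out = listmultiples_alt x1 x2
instance (x1 : Int) (x2 : Int) (out : List (List Int)) : Decidable (Spec_listmultiples x1 x2 out) := by unfold Spec_listmultiples; infer_instance

-- ===== CLAIM (what is proved, stated in full; the proofs are below) =====
def Claim_equal_listmultiples : Prop := ∀ (x1 : Int) (x2 : Int), Dom_listmultiples x1 x2 → Spec_listmultiples x1 x2 (listmultiples x1 x2)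

-- ===== LEMMAS AND PROOFS =====

-- ===== VERDICT (by name: the statement is the Claim_ definition above) =====
theorem listmultiples_spec : Claim_equal_listmultiples := by
  intro x1 x2 _
  unfold Spec_listmultiples listmultiples listmultiples_alt
  simp [PySem.List.pyRange, List.range_succ]
  ring_nf
  tauto
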